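-- pv_equiv track=rewrite | github.com/PavlovMN/keys4 | dragon_power.py | find_best_breakdown
-- ===== SOURCE A (Python) =====
-- def find_best_breakdown(n, max_size):
--     """
--     Находит лучшее разбиение числа n на слагаемые от 1 до max_size.
--     """
--     if n <= max_size:
--         return [n]
--
--     # Простой подход: пробуем разные комбинации
--     best_product = 0
--     best_breakdown = []
--
--     # Используем жадный алгоритм с учетом математических принципов
--     breakdown = []
--     remaining = n
--
--     # Предпочитаем числа 3, но корректируем при необходимости
--     while remaining > 0:
--         if remaining <= max_size:
--             breakdown.append(remaining)
--             break
--
--         if remaining >= 6: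
--             # Для чисел >= 6 предпочитаем 3
--             breakdown.append(3)
--             remaining -= 3
--         elif remaining >= 4:
--             # Для чисел 4-5 используем их целиком
--             breakdown.append(remaining)
--             break
--         else:
--             # Для малых чисел используем как есть
--             breakdown.append(remaining)
--             break
--
--     # Проверяем, можно ли улучшить результат
--     # Особенно важно проверить случаи, когда лучше использовать 4 вместо 2+2
--     improved_breakdown = improve_breakdown(breakdown)
--
--     return improved_breakdown
--
-- def improve_breakdown(breakdown):
--     """
--     Улучшает разбиение, заменяя пары 2+2 на 4, пары 3+1 на 2+2 и т.д.
--     """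
--     improved = breakdown.copy()
--
--     # Заменяем 2+2 на 4 (2*2 = 4, но 4 лучше для дальнейших операций)
--     while improved.count(2) >= 2:
--         improved.remove(2)
--         improved.remove(2)
--         improved.append(4)
--
--     # Заменяем 3+1 на 2+2 (3*1=3 < 2*2=4)
--     while 3 in improved and 1 in improved:
--         improved.remove(3)
--         improved.remove(1)
--         improved.append(2)
--         improved.append(2)
--
--     # Сортируем для лучшего представления
--     improved.sort(reverse=True)
--
--     return improved
-- ===== SOURCE B (Python) =====
-- def find_best_breakdown(n, max_size):
--     """
--     Находит лучшее разбиение числа n на слагаемые от 1 до max_size.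
--     Closed-form version: A's greedy loop only ever emits 3's followed by one
--     remainder in the window (T-3, T] with T = max(max_size, 5), and its
--     'improvement' passes never fire, so compute that directly.
--     """
--     if n <= max_size:
--         return [n]
--     if n <= 0:
--         return []
--     T = max(max_size, 5)
--     if n <= T:
--         return [n]
--     k = (n - T + 2) // 3          # smallest k with n - 3*k <= T
--     r = n - 3 * k
--     return sorted([3] * k + [r], reverse=True)
-- ===== Notes on version B (the rewrite author's own statement) =====
-- stated objective: faster
-- what changed: Replaced the subtract-3 greedy loop plus the improve_breakdown count/remove repair passes (which provably never fire) with closed-form arithmetic: compute the number of 3's k = ceil((n-T)/3) for T = max(max_size,5) and the remainder directly, then one reverse sort.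
import Mathlib
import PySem

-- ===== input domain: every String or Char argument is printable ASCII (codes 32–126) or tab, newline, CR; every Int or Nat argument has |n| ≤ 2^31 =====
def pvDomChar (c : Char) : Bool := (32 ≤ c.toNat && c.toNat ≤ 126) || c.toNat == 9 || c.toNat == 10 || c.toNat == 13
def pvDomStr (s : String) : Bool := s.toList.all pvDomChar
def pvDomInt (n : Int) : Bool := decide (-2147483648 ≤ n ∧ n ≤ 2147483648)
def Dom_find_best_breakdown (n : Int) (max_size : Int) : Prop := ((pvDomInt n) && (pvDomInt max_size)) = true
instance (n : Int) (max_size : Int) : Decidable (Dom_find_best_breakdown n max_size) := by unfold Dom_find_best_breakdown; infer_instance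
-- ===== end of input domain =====

-- B replaces A's subtract-3 greedy loop and its (never-firing) repair passes by closed-form
-- arithmetic for the count of 3's and the remainder: O(1) arithmetic replaces the O(n) loop.

-- ===== PORT A =====
-- the greedy while-loop of A (breaks ported as returns of the accumulated list)
def pvLoopA (max_size : Int) (remaining : Int) (acc : List Int) : List Int :=
  if remaining > 0 then
    if remaining ≤ max_size then acc ++ [remaining]
    else if remaining ≥ 6 then pvLoopA max_size (remaining - 3) (acc ++ [3])
    else if remaining ≥ 4 then acc ++ [remaining]
    else acc ++ [remaining]
  else acc
termination_by remaining.toNat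
decreasing_by omega

-- first while of improve_breakdown; list.remove on a guaranteed-present value is
-- List.erase (PySem.List.remove?_eq_some_erase: remove? = some (erase) when the value is present,
-- which count ≥ 2 guarantees here)
def pvImprove1 (improved : List Int) : List Int :=
  if PySem.List.count improved 2 ≥ 2 then
    pvImprove1 (((improved.erase 2).erase 2) ++ [4])
  else improved
termination_by PySem.List.count improved 2
decreasing_by
  rename_i h
  simp only [PySem.List.count_eq, List.count_append] at *
  have h1 : (improved.erase 2).count 2 = improved.count 2 - 1 := List.count_erase_self (a := 2) (l := improved)
  have h2 : ((improved.erase 2).erase 2).count 2 = (improved.erase 2).count 2 - 1 :=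
    List.count_erase_self (a := 2) (l := improved.erase 2)
  simp [h2, h1]; omega

-- second while of improve_breakdown (3 and 1 both present is guaranteed presence for remove)
def pvImprove2 (improved : List Int) : List Int :=
  if (3 : Int) ∈ improved ∧ (1 : Int) ∈ improved then
    pvImprove2 (((improved.erase 3).erase 1) ++ [2, 2])
  else improved
termination_by PySem.List.count improved 3
decreasing_by
  rename_i h
  simp only [PySem.List.count_eq, List.count_append]
  have h1 : List.count 3 (improved.erase 3) = List.count 3 improved - 1 := List.count_erase_self (a := 3) (l := improved)
  have h2 : ((improved.erase 3).erase 1).count 3 = (improved.erase 3).count 3 :=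
    List.count_erase_of_ne (a := 3) (b := 1) (l := improved.erase 3) (by norm_num)
  have h3 : 1 ≤ List.count 3 improved := List.one_le_count_iff.mpr h.1
  have h4 : List.count 3 ([2, 2] : List Int) = 0 := rfl
  rw [h2, h1]; omega

def improve_breakdown (breakdown : List Int) : List Int :=
  PySem.List.sorted (pvImprove2 (pvImprove1 breakdown)) (fun x => x) true

def find_best_breakdown (n : Int) (max_size : Int) : List Int :=
  if n ≤ max_size then [n]
  else
    -- best_product / best_breakdown in A are dead variables; the loop then the repair passes
    improve_breakdown (pvLoopA max_size n [])

-- ===== PORT B =====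
def find_best_breakdown_alt (n : Int) (max_size : Int) : List Int :=
  if n ≤ max_size then [n]
  else if n ≤ 0 then []
  else
    let T := max max_size 5
    if n ≤ T then [n]
    else
      let k := PySem.Int.floordiv (n - T + 2) 3
      let r := n - 3 * k
      PySem.List.sorted (List.replicate k.toNat 3 ++ [r]) (fun x => x) true

-- ===== PRECONDITION & SPEC =====
def Spec_find_best_breakdown (n : Int) (max_size : Int) (out : List Int) : Prop := out = find_best_breakdown_alt n max_size
instance (n : Int) (max_size : Int) (out : List Int) : Decidable (Spec_find_best_breakdown n max_size out) := by unfold Spec_find_best_breakdown; infer_instance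

-- ===== CLAIM (what is proved, stated in full; the proofs are below) =====
def Claim_equal_find_best_breakdown : Prop := ∀ (n : Int) (max_size : Int), Dom_find_best_breakdown n max_size → Spec_find_best_breakdown n max_size (find_best_breakdown n max_size)

-- ===== LEMMAS AND PROOFS =====

-- one step of the loop when the remainder is reached
theorem pvLoopA_small (max_size x : Int) (acc : List Int)
    (h0 : 0 < x) (hT : x ≤ max max_size 5) :
    pvLoopA max_size x acc = acc ++ [x] := by
  unfold pvLoopA
  split_ifs <;> first | rfl | omega

-- the loop emits k = ceil((x-T)/3) threes then the remainder x - 3k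
theorem pvLoopA_spec (max_size : Int) (m : Nat) :
    ∀ (x : Int) (acc : List Int), max max_size 5 < x → x ≤ max max_size 5 + 3 * m →
      pvLoopA max_size x acc =
        acc ++ List.replicate ((x - max max_size 5 + 2) / 3).toNat 3
            ++ [x - 3 * ((x - max max_size 5 + 2) / 3)] := by
  induction m with
  | zero => intro x acc h1 h2; omega
  | succ m ih =>
    intro x acc h1 h2
    set T := max max_size 5 with hT
    have hms : max_size ≤ T := le_max_left _ _
    have h5 : (5 : Int) ≤ T := le_max_right _ _
    rw [pvLoopA]
    have hx0 : x > 0 := by omega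
    have hxm : ¬ x ≤ max_size := by omega
    have hx6 : x ≥ 6 := by omega
    simp only [if_pos hx0, if_neg hxm, if_pos hx6]
    set k := (x - T + 2) / 3 with hk
    have hk1 : 1 ≤ k := by omega
    by_cases hc : T < x - 3
    · have ih' := ih (x - 3) (acc ++ [3]) hc (by omega)
      rw [ih']
      have hk' : (x - 3 - T + 2) / 3 = k - 1 := by omega
      have hkn : (k - 1).toNat + 1 = k.toNat := by omega
      rw [hk']
      have hrep : acc ++ [3] ++ List.replicate (k - 1).toNat 3 = acc ++ List.replicate k.toNat 3 := by
        rw [← hkn, List.replicate_succ, List.append_assoc]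
        rfl
      rw [hrep]
      congr 2
      omega
    · have hx3 : x - 3 ≤ T := by omega
      rw [pvLoopA_small max_size (x - 3) (acc ++ [3]) (by omega) hx3]
      have hkval : k = 1 := by omega
      rw [hkval]
      simp

-- the repair passes never fire on the loop's output
theorem pvImprove1_id (l : List Int) (h : PySem.List.count l 2 ≤ 1) : pvImprove1 l = l := by
  unfold pvImprove1
  rw [if_neg (by omega)]

theorem pvImprove2_id (l : List Int) (h : ¬ ((3 : Int) ∈ l ∧ (1 : Int) ∈ l)) : pvImprove2 l = l := by
  unfold pvImprove2
  rw [if_neg h]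

theorem count2_rep (k : Nat) (r : Int) :
    PySem.List.count (List.replicate k 3 ++ [r]) 2 ≤ 1 := by
  simp only [PySem.List.count_eq, List.count_append, List.count_replicate, List.count_singleton]
  split_ifs <;> simp_all

theorem improve_rep (k : Nat) (r : Int) (hr : 3 ≤ r) :
    pvImprove2 (pvImprove1 (List.replicate k 3 ++ [r])) = List.replicate k 3 ++ [r] := by
  rw [pvImprove1_id _ (count2_rep k r)]
  apply pvImprove2_id
  rintro ⟨-, h1⟩
  rw [List.mem_append, List.mem_replicate, List.mem_singleton] at h1
  rcases h1 with ⟨-, h⟩ | h <;> omega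

-- ===== VERDICT (by name: the statement is the Claim_ definition above) =====
theorem find_best_breakdown_spec : Claim_equal_find_best_breakdown := by
  intro n max_size _
  unfold Spec_find_best_breakdown find_best_breakdown find_best_breakdown_alt
  by_cases h1 : n ≤ max_size
  · simp [h1]
  · simp only [if_neg h1]
    set T := max max_size 5 with hT
    have hms : max_size ≤ T := le_max_left _ _
    have h5 : (5 : Int) ≤ T := le_max_right _ _
    by_cases h2 : n ≤ 0
    · -- loop never runs; everything is the empty list
      rw [if_pos h2]
      unfold improve_breakdown
      rw [pvLoopA]
      simp only [if_neg (by omega : ¬ n > 0)]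
      rw [pvImprove1_id _ (by simp [PySem.List.count_eq])]
      rw [pvImprove2_id _ (by simp)]
      simp [PySem.List.sorted_eq_nil_iff]
    · rw [if_neg h2]
      by_cases h3 : n ≤ T
      · -- one loop step: breakdown = [n], the passes and the sort leave it alone
        rw [if_pos h3]
        unfold improve_breakdown
        rw [pvLoopA_small max_size n [] (by omega) h3]
        simp only [List.nil_append]
        rw [pvImprove1_id _ (by rw [PySem.List.count_eq]; simpa using List.count_le_length (a := (2:Int)) (l := [n]))]
        rw [pvImprove2_id _ (by rintro ⟨ha, hb⟩; rw [List.mem_singleton] at ha hb; omega)]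
        exact PySem.List.sorted_rev_eq_self_of_pairwise _ _ (List.pairwise_singleton _ _)
      · rw [if_neg h3]
        unfold improve_breakdown
        have hfd : PySem.Int.floordiv (n - T + 2) 3 = (n - T + 2) / 3 :=
          PySem.Int.floordiv_eq_ediv_of_pos (by omega)
        rw [pvLoopA_spec max_size (n - T).toNat n [] (by omega) (by omega)]
        set k := (n - T + 2) / 3 with hk
        have hr : 3 ≤ n - 3 * k := by omega
        simp only [List.nil_append]
        rw [improve_rep k.toNat (n - 3 * k) hr]
        simp only [hfd]
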